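-- pv_equiv track=rewrite | github.com/chiralcentre/Kattis | quantum.py | quantum
-- ===== SOURCE A (Python) =====
-- def quantum(op,w):
--     for i in range(len(op)):
--         j = len(op) - i - 1
--         if op[i] == "F":
--             w ^= (1 << j)
--         elif op[i] == "S":
--             w |= (1 << j)
--         elif op[i] == "C":
--             w &= ~(1 << j)
--     return w
-- ===== SOURCE B (Python) =====
-- def quantum(op, w):
--     n = len(op)
--     fmask = smask = cmask = 0
--     for i, ch in enumerate(op):
--         bit = 1 << (n - i - 1)
--         if ch == "F":
--             fmask |= bit
--         elif ch == "S":
--             smask |= bit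
--         elif ch == "C":
--             cmask |= bit
--     return ((w ^ fmask) | smask) & ~cmask
-- ===== Notes on version B (the rewrite author's own statement) =====
-- stated objective: alternative
-- what changed: Instead of mutating w per character, B builds three disjoint flip/set/clear bit masks in one pass and applies them to w once in bulk ((w ^ f) | s) & ~c, which is exact because each bit position is governed by exactly one character.
import Mathlib
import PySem

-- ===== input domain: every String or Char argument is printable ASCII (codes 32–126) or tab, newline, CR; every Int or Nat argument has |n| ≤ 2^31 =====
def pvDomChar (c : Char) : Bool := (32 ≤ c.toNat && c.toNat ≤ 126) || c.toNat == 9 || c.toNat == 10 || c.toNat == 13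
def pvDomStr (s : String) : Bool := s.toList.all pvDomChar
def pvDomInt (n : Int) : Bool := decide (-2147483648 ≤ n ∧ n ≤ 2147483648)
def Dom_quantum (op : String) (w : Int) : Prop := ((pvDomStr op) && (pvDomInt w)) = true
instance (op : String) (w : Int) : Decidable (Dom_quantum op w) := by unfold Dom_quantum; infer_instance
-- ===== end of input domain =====

-- B builds three disjoint flip/set/clear masks in one pass and applies them to w once in bulk;
-- A mutates w per character. Same value on every input (both are total).

-- ===== PORT A =====
-- A's loop 'for i in range(len(op)): j = len(op)-i-1; …' as structural recursion over the
-- character list, carrying the running index i and mutating w step by step, as A does.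
def quantumGo (n i : Nat) (cs : List Char) (w : Int) : Int :=
  match cs with
  | [] => w
  | ch :: rest =>
      let j := n - i - 1
      let w' :=
        if ch = 'F' then PySem.Int.bxor w ((1 : Int) <<< j)
        else if ch = 'S' then PySem.Int.bor w ((1 : Int) <<< j)
        else if ch = 'C' then PySem.Int.band w (Int.not ((1 : Int) <<< j))
        else w
      quantumGo n (i + 1) rest w'

def quantum (op : String) (w : Int) : Int :=
  quantumGo op.toList.length 0 op.toList w

-- ===== PORT B =====
-- B's mask-building loop 'for i, ch in enumerate(op): …' as structural recursion carrying the
-- three mask accumulators; the masks are applied once after the loop.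
def quantumMasks (n i : Nat) (cs : List Char) (f s c : Int) : Int × Int × Int :=
  match cs with
  | [] => (f, s, c)
  | ch :: rest =>
      let bit : Int := (1 : Int) <<< (n - i - 1)
      if ch = 'F' then quantumMasks n (i + 1) rest (PySem.Int.bor f bit) s c
      else if ch = 'S' then quantumMasks n (i + 1) rest f (PySem.Int.bor s bit) c
      else if ch = 'C' then quantumMasks n (i + 1) rest f s (PySem.Int.bor c bit)
      else quantumMasks n (i + 1) rest f s c

def quantum_alt (op : String) (w : Int) : Int :=
  let ms := quantumMasks op.toList.length 0 op.toList 0 0 0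
  PySem.Int.band (PySem.Int.bor (PySem.Int.bxor w ms.1) ms.2.1) (Int.not ms.2.2)

-- ===== PRECONDITION & SPEC =====
def Spec_quantum (op : String) (w : Int) (out : Int) : Prop := out = quantum_alt op w
instance (op : String) (w : Int) (out : Int) : Decidable (Spec_quantum op w out) := by unfold Spec_quantum; infer_instance

-- ===== CLAIM (what is proved, stated in full; the proofs are below) =====
def Claim_equal_quantum : Prop := ∀ (op : String) (w : Int), Dom_quantum op w → Spec_quantum op w (quantum op w)

-- ===== LEMMAS AND PROOFS =====

-- bulk application of the three masks: ((w ^ f) | s) & ~c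
def applyM (f s c w : Int) : Int :=
  PySem.Int.band (PySem.Int.bor (PySem.Int.bxor w f) s) (Int.not c)

lemma tb_coe (m i : Nat) : ((m : Int)).testBit i = m.testBit i := rfl

lemma tb_negCoe (m i : Nat) : (-(m : Int) - 1).testBit i = !m.testBit i := by
  have h : -(m : Int) - 1 = Int.negSucc m := by
    rw [Int.negSucc_eq]; ring
  rw [h]; rfl

lemma mod_two_eq_ite (x : Nat) : x % 2 = if x.testBit 0 then 1 else 0 := by
  rw [Nat.testBit_zero]
  rcases Nat.mod_two_eq_zero_or_one x with h | h <;> simp [h]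

lemma ldiff_div_two (m n : Nat) : Nat.ldiff m n / 2 = Nat.ldiff (m / 2) (n / 2) :=
  Nat.eq_of_testBit_eq (fun i => by
    simp [Nat.testBit_div_two, Nat.testBit_ldiff])

lemma and_add_ldiff (m : Nat) : ∀ n, (m &&& n) + Nat.ldiff m n = m := by
  induction m using Nat.strong_induction_on with
  | _ m IH =>
    intro n
    rcases Nat.eq_zero_or_pos m with hm | hm
    · subst hm
      have h2 : Nat.ldiff 0 n = 0 :=
        Nat.eq_of_testBit_eq (fun i => by simp [Nat.testBit_ldiff])
      simp [h2]
    · have hd : m / 2 < m := Nat.div_lt_self hm one_lt_two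
      have IH2 := IH (m / 2) hd (n / 2)
      have e1 : 2 * ((m / 2) &&& (n / 2)) + (m &&& n) % 2 = m &&& n := by
        rw [← Nat.and_div_two]; omega
      have e2 : 2 * Nat.ldiff (m / 2) (n / 2) + Nat.ldiff m n % 2 = Nat.ldiff m n := by
        rw [← ldiff_div_two]; omega
      have hb : (m &&& n) % 2 + Nat.ldiff m n % 2 = m % 2 := by
        rw [mod_two_eq_ite, mod_two_eq_ite, mod_two_eq_ite (x := m)]
        rw [Nat.testBit_and, Nat.testBit_ldiff]
        cases m.testBit 0 <;> cases n.testBit 0 <;> simp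
      omega

lemma sub_and_eq_ldiff (m n : Nat) : m - (m &&& n) = Nat.ldiff m n := by
  have := and_add_ldiff m n
  omega

-- canonical negative form
lemma neg_form (a : Int) (h : ¬ 0 ≤ a) : a = -(((-a - 1).toNat : Int)) - 1 := by
  have := Int.toNat_of_nonneg (show 0 ≤ -a - 1 by omega)
  omega

lemma tb_band (a b : Int) (i : Nat) :
    (PySem.Int.band a b).testBit i = (a.testBit i && b.testBit i) := by
  unfold PySem.Int.band
  split_ifs with h1 h2 h2
  · conv_rhs => rw [← Int.toNat_of_nonneg h1, ← Int.toNat_of_nonneg h2]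
    rw [tb_coe, tb_coe, tb_coe, Nat.testBit_and]
  · conv_rhs => rw [← Int.toNat_of_nonneg h1, neg_form b h2]
    rw [tb_coe, sub_and_eq_ldiff, tb_coe, tb_negCoe, Nat.testBit_ldiff]
  · conv_rhs => rw [neg_form a h1, ← Int.toNat_of_nonneg h2]
    rw [tb_coe, sub_and_eq_ldiff, tb_negCoe, tb_coe, Nat.testBit_ldiff]
    cases (b.toNat).testBit i <;> simp
  · conv_rhs => rw [neg_form a h1, neg_form b h2]
    rw [tb_negCoe, tb_negCoe, tb_negCoe, Nat.testBit_or]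
    cases ((-a - 1).toNat).testBit i <;> simp

lemma tb_bor (a b : Int) (i : Nat) :
    (PySem.Int.bor a b).testBit i = (a.testBit i || b.testBit i) := by
  unfold PySem.Int.bor
  split_ifs with h1 h2 h2
  · conv_rhs => rw [← Int.toNat_of_nonneg h1, ← Int.toNat_of_nonneg h2]
    rw [tb_coe, tb_coe, tb_coe, Nat.testBit_or]
  · conv_rhs => rw [← Int.toNat_of_nonneg h1, neg_form b h2]
    rw [tb_negCoe, sub_and_eq_ldiff, tb_coe, tb_negCoe, Nat.testBit_ldiff]
    cases (a.toNat).testBit i <;> simp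
  · conv_rhs => rw [neg_form a h1, ← Int.toNat_of_nonneg h2]
    rw [tb_negCoe, sub_and_eq_ldiff, tb_negCoe, tb_coe, Nat.testBit_ldiff]
    cases (b.toNat).testBit i <;> simp
  · conv_rhs => rw [neg_form a h1, neg_form b h2]
    rw [tb_negCoe, tb_negCoe, tb_negCoe, Nat.testBit_and]
    cases ((-a - 1).toNat).testBit i <;> simp

lemma tb_bxor (a b : Int) (i : Nat) :
    (PySem.Int.bxor a b).testBit i = ((a.testBit i).xor (b.testBit i)) := by
  unfold PySem.Int.bxor
  split_ifs with h1 h2 h2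
  · conv_rhs => rw [← Int.toNat_of_nonneg h1, ← Int.toNat_of_nonneg h2]
    rw [tb_coe, tb_coe, tb_coe, Nat.testBit_xor]
  · conv_rhs => rw [← Int.toNat_of_nonneg h1, neg_form b h2]
    rw [tb_negCoe, tb_coe, tb_negCoe, Nat.testBit_xor]
    cases (a.toNat).testBit i <;> simp
  · conv_rhs => rw [neg_form a h1, ← Int.toNat_of_nonneg h2]
    rw [tb_negCoe, tb_negCoe, tb_coe, Nat.testBit_xor]
    cases ((-a - 1).toNat).testBit i <;> simp
  · conv_rhs => rw [neg_form a h1, neg_form b h2]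
    rw [tb_coe, tb_negCoe, tb_negCoe, Nat.testBit_xor]
    cases ((-a - 1).toNat).testBit i <;> cases ((-b - 1).toNat).testBit i <;> simp

lemma tb_not (a : Int) (i : Nat) : (Int.not a).testBit i = !a.testBit i := by
  cases a <;> simp [Int.not, Int.testBit]

lemma tb_zero (i : Nat) : (0 : Int).testBit i = false := by
  simp [Int.testBit]

lemma tb_shift (j i : Nat) : ((1 : Int) <<< j).testBit i = decide (j = i) := by
  have h : ((1 : Int) <<< j) = ((2 ^ j : Nat) : Int) := by
    simp [Int.shiftLeft_eq]
  rw [h, tb_coe, Nat.testBit_two_pow]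

lemma intExt (a b : Int) (h : ∀ i, a.testBit i = b.testBit i) : a = b := by
  cases a with
  | ofNat m =>
    cases b with
    | ofNat n =>
      congr 1
      exact Nat.eq_of_testBit_eq (fun i => h i)
    | negSucc n =>
      exfalso
      have hm : m.testBit (m + n + 1) = false :=
        Nat.testBit_lt_two_pow (lt_of_le_of_lt (by omega) (Nat.lt_two_pow_self))
      have hn : n.testBit (m + n + 1) = false :=
        Nat.testBit_lt_two_pow (lt_of_le_of_lt (by omega) (Nat.lt_two_pow_self))
      have := h (m + n + 1)
      simp [Int.testBit, hm, hn] at this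
  | negSucc m =>
    cases b with
    | ofNat n =>
      exfalso
      have hm : m.testBit (m + n + 1) = false :=
        Nat.testBit_lt_two_pow (lt_of_le_of_lt (by omega) (Nat.lt_two_pow_self))
      have hn : n.testBit (m + n + 1) = false :=
        Nat.testBit_lt_two_pow (lt_of_le_of_lt (by omega) (Nat.lt_two_pow_self))
      have := h (m + n + 1)
      simp [Int.testBit, hm, hn] at this
    | negSucc n =>
      congr 1
      refine Nat.eq_of_testBit_eq (fun i => ?_)
      have := h i
      simp [Int.testBit] at this
      exact this

lemma tb_applyM (f s c w : Int) (i : Nat) :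
    (applyM f s c w).testBit i =
      ((((w.testBit i).xor (f.testBit i)) || s.testBit i) && !c.testBit i) := by
  simp [applyM, tb_band, tb_bor, tb_bxor, tb_not]

lemma core_xor (f s c w : Int) (j : Nat) (hf : f.testBit j = false)
    (hs : s.testBit j = false) (hc : c.testBit j = false) :
    PySem.Int.bxor (applyM f s c w) ((1 : Int) <<< j) =
      applyM (PySem.Int.bor f ((1 : Int) <<< j)) s c w := by
  apply intExt; intro i
  rw [tb_bxor, tb_applyM, tb_applyM, tb_bor, tb_shift]
  by_cases hij : j = i
  · subst hij
    rw [hf, hs, hc]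
    cases w.testBit j <;> simp
  · simp [hij]

lemma core_or (f s c w : Int) (j : Nat) (hc : c.testBit j = false) :
    PySem.Int.bor (applyM f s c w) ((1 : Int) <<< j) =
      applyM f (PySem.Int.bor s ((1 : Int) <<< j)) c w := by
  apply intExt; intro i
  rw [tb_bor, tb_applyM, tb_applyM, tb_bor, tb_shift]
  by_cases hij : j = i
  · subst hij
    rw [hc]
    cases ((w.testBit j).xor (f.testBit j)) <;> simp
  · simp [hij]

lemma core_and (f s c w : Int) (j : Nat) :
    PySem.Int.band (applyM f s c w) (Int.not ((1 : Int) <<< j)) =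
      applyM f s (PySem.Int.bor c ((1 : Int) <<< j)) w := by
  apply intExt; intro i
  rw [tb_band, tb_applyM, tb_applyM, tb_bor, tb_not, tb_shift]
  by_cases hij : j = i
  · subst hij; simp
  · simp [hij]

lemma applyM_zero (w : Int) : applyM 0 0 0 w = w := by
  apply intExt; intro i
  rw [tb_applyM]
  simp [tb_zero]

lemma free_step (b : Int) (n i p : Nat) (hp : p < n - (i + 1)) (hb : b.testBit p = false) :
    (PySem.Int.bor b ((1 : Int) <<< (n - i - 1))).testBit p = false := by
  rw [tb_bor, tb_shift, hb]
  simp only [Bool.false_or, decide_eq_false_iff_not]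
  omega

lemma go_eq (cs : List Char) : ∀ (n i : Nat) (f s c w : Int),
    i + cs.length ≤ n →
    (∀ p, p < n - i → f.testBit p = false ∧ s.testBit p = false ∧ c.testBit p = false) →
    quantumGo n i cs (applyM f s c w) =
      applyM (quantumMasks n i cs f s c).1 (quantumMasks n i cs f s c).2.1
        (quantumMasks n i cs f s c).2.2 w := by
  induction cs with
  | nil => intro n i f s c w _ _; rfl
  | cons ch rest IH =>
    intro n i f s c w hlen hfree
    simp only [List.length_cons] at hlen
    have hj : n - i - 1 < n - i := by omega
    obtain ⟨hf, hs, hc⟩ := hfree (n - i - 1) hj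
    simp only [quantumGo, quantumMasks]
    by_cases hF : ch = 'F'
    · rw [if_pos hF, if_pos hF, core_xor f s c w (n - i - 1) hf hs hc]
      exact IH n (i + 1) _ s c w (by omega) (fun p hp =>
        ⟨free_step f n i p hp (hfree p (by omega)).1,
         (hfree p (by omega)).2.1, (hfree p (by omega)).2.2⟩)
    · rw [if_neg hF, if_neg hF]
      by_cases hS : ch = 'S'
      · rw [if_pos hS, if_pos hS, core_or f s c w (n - i - 1) hc]
        exact IH n (i + 1) f _ c w (by omega) (fun p hp =>
          ⟨(hfree p (by omega)).1,
           free_step s n i p hp (hfree p (by omega)).2.1, (hfree p (by omega)).2.2⟩)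
      · rw [if_neg hS, if_neg hS]
        by_cases hC : ch = 'C'
        · rw [if_pos hC, if_pos hC, core_and f s c w (n - i - 1)]
          exact IH n (i + 1) f s _ w (by omega) (fun p hp =>
            ⟨(hfree p (by omega)).1, (hfree p (by omega)).2.1,
             free_step c n i p hp (hfree p (by omega)).2.2⟩)
        · rw [if_neg hC, if_neg hC]
          exact IH n (i + 1) f s c w (by omega) (fun p hp => hfree p (by omega))

-- ===== VERDICT (by name: the statement is the Claim_ definition above) =====
theorem quantum_spec : Claim_equal_quantum := by
  intro op w _
  unfold Spec_quantum quantum quantum_alt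
  rw [← applyM_zero w, go_eq op.toList op.toList.length 0 0 0 0 w (by omega)
    (fun p _ => ⟨tb_zero p, tb_zero p, tb_zero p⟩)]
  rw [applyM_zero]
  rfl
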